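-- pv_equiv track=rewrite | github.com/nim-hrkn/FunctionDecompositionNetworkHelper | prog/convymlv21.py | change_group
-- ===== SOURCE A (Python) =====
-- from collections import OrderedDict
--
-- def change_group(group):
--     groups = []
--     for g in group:
--         dic = OrderedDict()
--
--         try:
--             funcname = g["funcname"]
--         except:
--             funcname = None
--         try:
--             functype = g["functype"]
--         except:
--             functype = None
--         try:
--             methodname = g["methodname"]
--         except:
--             methodname = None
--         try:
--             methodtype = g["methodtype"]
--         except:
--             methodtype = None
--
--         if methodname is not None and methodtype is not None:
--             dic1 = OrderedDict([( 'methodname',methodname), ('methodtype',methodtype)] )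
--             dic.update(dic1)
--         if methodname is not None and methodtype is None:
--             dic1 = OrderedDict([( 'methodname',methodname) ] )
--             dic.update(dic1)
--
--         if funcname is not None and functype is not None:
--             dic1 = OrderedDict([( 'funcname',funcname), ('functype',functype)]  )
--             dic.update(dic1)
--         if funcname is not None and functype is None:
--             dic1 = OrderedDict([('funcname',funcname)]  )
--             dic.update(dic1)
--         groups.append(dic)
--     return groups
-- ===== SOURCE B (Python) =====
-- from collections import OrderedDict
--
-- KEYS = ['methodname', 'methodtype', 'funcname', 'functype']
-- DEPENDS = {'methodtype': 'methodname', 'functype': 'funcname'}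
--
--
-- def change_group(group):
--     def lk(g, k):
--         try:
--             return g[k]
--         except:
--             return None
--     return [OrderedDict((k, v) for k in KEYS
--                         if (v := lk(g, k)) is not None
--                         and lk(g, DEPENDS.get(k, k)) is not None)
--             for g in group]
-- ===== Notes on version B (the rewrite author's own statement) =====
-- stated objective: simpler
-- what changed: Replaces A's imperative fetch-all-then-four-conditional-update blocks with a single declarative filtered comprehension over a flat canonical key list plus a dependency map (a type key is kept only if its name key is present), so no per-group branching code remains.
import Mathlib
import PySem

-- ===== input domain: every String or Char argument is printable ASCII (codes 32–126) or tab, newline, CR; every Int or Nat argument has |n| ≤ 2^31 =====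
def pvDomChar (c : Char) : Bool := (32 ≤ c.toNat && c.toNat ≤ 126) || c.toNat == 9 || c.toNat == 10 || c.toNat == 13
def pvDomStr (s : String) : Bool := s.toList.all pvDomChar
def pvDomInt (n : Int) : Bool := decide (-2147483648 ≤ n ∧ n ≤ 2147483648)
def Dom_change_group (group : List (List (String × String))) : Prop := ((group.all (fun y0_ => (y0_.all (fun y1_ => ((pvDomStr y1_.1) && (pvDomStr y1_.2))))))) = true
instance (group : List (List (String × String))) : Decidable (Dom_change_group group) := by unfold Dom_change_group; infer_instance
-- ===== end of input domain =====

-- B replaces A's four unrolled conditional-update blocks with one declarative filtered comprehension over a canonical key list with a dependency map; objective: simpler.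


-- ===== PORT A =====
-- g["k"] on the dict g = (PySem.Dict.ofList g).get? "k"; try/except keeps the Option.
-- dic.update(dic1) with keys not yet in dic appends dic1's items, so dic is the list of appended pairs.
def change_group (group : List (List (String × String))) : List (List (String × String)) :=
  group.foldl (fun groups g =>
    let d := PySem.Dict.ofList g
    let funcname := d.get? "funcname"
    let functype := d.get? "functype"
    let methodname := d.get? "methodname"
    let methodtype := d.get? "methodtype"
    let dic : List (String × String) := []
    let dic := match methodname, methodtype with
      | some mn, some mt => dic ++ [("methodname", mn), ("methodtype", mt)]
      | _, _ => dic
    let dic := match methodname, methodtype with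
      | some mn, none => dic ++ [("methodname", mn)]
      | _, _ => dic
    let dic := match funcname, functype with
      | some fn, some ft => dic ++ [("funcname", fn), ("functype", ft)]
      | _, _ => dic
    let dic := match funcname, functype with
      | some fn, none => dic ++ [("funcname", fn)]
      | _, _ => dic
    groups ++ [dic]) []

-- ===== PORT B =====
-- B: a key k of the canonical list is kept iff g has k AND g has k's dependency (a type key
-- depends on its name key; a name key depends on itself), expressed as one filterMap.
def cgKeys : List String := ["methodname", "methodtype", "funcname", "functype"]

def cgDep (k : String) : String :=
  if k = "methodtype" then "methodname"
  else if k = "functype" then "funcname"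
  else k

def cgRow (g : List (String × String)) : List (String × String) :=
  cgKeys.filterMap (fun k =>
    match (PySem.Dict.ofList g).get? k with
    | none => none
    | some v =>
      if ((PySem.Dict.ofList g).get? (cgDep k)).isSome then some (k, v) else none)

def change_group_alt (group : List (List (String × String))) : List (List (String × String)) :=
  group.map cgRow

-- ===== PRECONDITION & SPEC =====
def Spec_change_group (group : List (List (String × String))) (out : List (List (String × String))) : Prop := out = change_group_alt group
instance (group : List (List (String × String))) (out : List (List (String × String))) : Decidable (Spec_change_group group out) := by unfold Spec_change_group; infer_instance

-- ===== CLAIM (what is proved, stated in full; the proofs are below) =====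
def Claim_equal_change_group : Prop := ∀ (group : List (List (String × String))), Dom_change_group group → Spec_change_group group (change_group group)

-- ===== LEMMAS AND PROOFS =====
-- A's per-element row equals B's per-element row: case split on the four lookups.
theorem cgRow_eq (g : List (String × String)) :
    (let d := PySem.Dict.ofList g
     let funcname := d.get? "funcname"
     let functype := d.get? "functype"
     let methodname := d.get? "methodname"
     let methodtype := d.get? "methodtype"
     let dic : List (String × String) := []
     let dic := match methodname, methodtype with
       | some mn, some mt => dic ++ [("methodname", mn), ("methodtype", mt)]
       | _, _ => dic
     let dic := match methodname, methodtype with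
       | some mn, none => dic ++ [("methodname", mn)]
       | _, _ => dic
     let dic := match funcname, functype with
       | some fn, some ft => dic ++ [("funcname", fn), ("functype", ft)]
       | _, _ => dic
     let dic := match funcname, functype with
       | some fn, none => dic ++ [("funcname", fn)]
       | _, _ => dic
     dic) = cgRow g := by
  cases hfn : (PySem.Dict.ofList g).get? "funcname" <;>
    cases hft : (PySem.Dict.ofList g).get? "functype" <;>
      cases hmn : (PySem.Dict.ofList g).get? "methodname" <;>
        cases hmt : (PySem.Dict.ofList g).get? "methodtype" <;>
          simp [cgRow, cgKeys, cgDep, List.filterMap, hfn, hft, hmn, hmt]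

-- ===== VERDICT (by name: the statement is the Claim_ definition above) =====
theorem change_group_spec : Claim_equal_change_group := by
  intro group _
  show change_group group = change_group_alt group
  unfold change_group change_group_alt
  rw [PySem.List.foldl_append_singleton_eq_map]
  exact List.map_congr_left (fun g _ => cgRow_eq g)
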